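-- pv_equiv track=rewrite | github.com/Orken/omv-homeassistant | custom_components/openmediavault/omv.py | _filesystem_matches_disk_prefix
-- ===== SOURCE A (Python) =====
-- from typing import Any, Dict, Iterable, List, Optional, Sequence, Set
--
-- def _filesystem_matches_disk_prefix(devicefile: Optional[str], disk_keys: Set[str]) -> bool:
--     if not devicefile:
--         return False
--     for key in disk_keys:
--         if not key:
--             continue
--         if devicefile.startswith(key):
--             return True
--         if key.startswith("/dev/") and devicefile.startswith(key.replace("/dev/", "", 1)):
--             return True
--     return False
-- ===== SOURCE B (Python) =====
-- def _filesystem_matches_disk_prefix(devicefile, disk_keys):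
--     if not devicefile:
--         return False
--     prefixes = set()
--     for key in disk_keys:
--         if key:
--             prefixes.add(key)
--             if key.startswith("/dev/"):
--                 prefixes.add(key[5:])
--     n = len(devicefile)
--     return any(l <= n and devicefile[:l] in prefixes for l in {len(p) for p in prefixes})
-- ===== Notes on version B (the rewrite author's own statement) =====
-- stated objective: alternative
-- what changed: B precomputes a set of admissible prefixes in one pass over the keys (each non-empty key, plus key[5:] for keys starting with '/dev/') and then tests devicefile's prefixes of exactly the lengths occurring in that set, instead of scanning the keys with startswith and an inline replace per key.
import Mathlib
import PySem

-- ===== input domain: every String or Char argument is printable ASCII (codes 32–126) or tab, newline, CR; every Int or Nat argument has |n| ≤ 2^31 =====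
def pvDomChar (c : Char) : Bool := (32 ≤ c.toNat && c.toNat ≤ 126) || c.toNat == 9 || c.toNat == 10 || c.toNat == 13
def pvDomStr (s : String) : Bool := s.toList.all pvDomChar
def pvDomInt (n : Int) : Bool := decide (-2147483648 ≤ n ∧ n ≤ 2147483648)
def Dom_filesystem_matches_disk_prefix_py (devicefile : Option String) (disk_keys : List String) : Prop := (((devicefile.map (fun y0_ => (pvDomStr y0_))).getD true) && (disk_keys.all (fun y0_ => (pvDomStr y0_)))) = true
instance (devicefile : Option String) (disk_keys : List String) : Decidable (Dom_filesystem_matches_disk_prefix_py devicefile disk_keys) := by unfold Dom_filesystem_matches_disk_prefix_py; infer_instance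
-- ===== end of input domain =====

-- B replaces A's per-key startswith/replace scan by a one-pass prefix set plus a scan over devicefile's prefixes (objective: alternative).

-- ===== PORT A =====
-- hand port of key.replace("/dev/", "", 1): "/dev/" is non-empty and new is "", so Python
-- removes exactly the first occurrence of "/dev/" (exact for this call).
def pvReplaceFirstDev (s : List Char) : List Char :=
  let i := PySem.Chars.find s "/dev/".toList
  if i = -1 then s else s.take i.toNat ++ s.drop (i.toNat + 5)

def fmA_loop (d : List Char) : List String → Bool
  | [] => false
  | k :: ks =>
    if k = "" then fmA_loop d ks
    else if PySem.Chars.startswith d k.toList then true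
    else if PySem.Chars.startswith k.toList "/dev/".toList
            && PySem.Chars.startswith d (pvReplaceFirstDev k.toList) then true
    else fmA_loop d ks

def filesystem_matches_disk_prefix_py (devicefile : Option String) (disk_keys : List String) : Bool :=
  match devicefile with
  | none => false
  | some d => if d = "" then false else fmA_loop d.toList disk_keys

-- ===== PORT B =====
-- loop body of B's single pass over disk_keys (add the key; if it starts with "/dev/", also add key[5:])
def fmB_step (s : PySem.Set String) (k : String) : PySem.Set String :=
  if k ≠ "" then
    if PySem.Str.startswith k "/dev/" then
      PySem.Set.add (PySem.Set.add s k) (PySem.Str.slice k (some 5) none)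
    else PySem.Set.add s k
  else s

def fmB_prefixes (disk_keys : List String) : PySem.Set String :=
  disk_keys.foldl fmB_step PySem.Set.empty

def filesystem_matches_disk_prefix_py_alt (devicefile : Option String) (disk_keys : List String) : Bool :=
  match devicefile with
  | none => false
  | some d =>
    if d = "" then false
    else
      let prefixes := fmB_prefixes disk_keys
      let n := PySem.Str.len d
      (PySem.Set.ofList (prefixes.map (fun p => PySem.Str.len p))).any
        (fun l => decide (l ≤ n) && PySem.Set.contains prefixes (PySem.Str.slice d none (some l)))

-- ===== PRECONDITION & SPEC =====
def Spec_filesystem_matches_disk_prefix_py (devicefile : Option String) (disk_keys : List String) (out : Bool) : Prop := out = filesystem_matches_disk_prefix_py_alt devicefile disk_keys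
instance (devicefile : Option String) (disk_keys : List String) (out : Bool) : Decidable (Spec_filesystem_matches_disk_prefix_py devicefile disk_keys out) := by unfold Spec_filesystem_matches_disk_prefix_py; infer_instance

-- ===== CLAIM (what is proved, stated in full; the proofs are below) =====
def Claim_equal_filesystem_matches_disk_prefix_py : Prop := ∀ (devicefile : Option String) (disk_keys : List String), Dom_filesystem_matches_disk_prefix_py devicefile disk_keys → Spec_filesystem_matches_disk_prefix_py devicefile disk_keys (filesystem_matches_disk_prefix_py devicefile disk_keys)

-- ===== LEMMAS AND PROOFS =====

-- the match predicate both sides decide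
def fmP (d : List Char) (ks : List String) : Prop :=
  ∃ k ∈ ks, k ≠ "" ∧ (k.toList <+: d ∨ ("/dev/".toList <+: k.toList ∧ k.toList.drop 5 <+: d))

lemma find_eq_zero_of_prefix (s p : List Char) (h : p <+: s) :
    PySem.Chars.find s p = 0 := by
  have hnn : 0 ≤ PySem.Chars.find s p := (PySem.Chars.find_nonneg_iff s p).mpr h.isInfix
  obtain ⟨-, hmin⟩ := PySem.Chars.find_spec hnn
  by_contra hne
  exact (hmin 0 (by omega)) (by simpa using h)

lemma replaceFirstDev_of_prefix (k : List Char) (h : "/dev/".toList <+: k) :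
    pvReplaceFirstDev k = k.drop 5 := by
  unfold pvReplaceFirstDev
  rw [find_eq_zero_of_prefix k _ h]
  simp

lemma fmA_loop_iff (d : List Char) (ks : List String) :
    fmA_loop d ks = true ↔ fmP d ks := by
  induction ks with
  | nil => simp [fmA_loop, fmP]
  | cons k ks ih =>
    unfold fmA_loop
    split_ifs with h1 h2 h3
    · rw [ih]; unfold fmP; simp [h1]
    · simp only [true_iff]
      exact ⟨k, by simp, h1, Or.inl ((PySem.Chars.startswith_iff d k.toList).mp h2)⟩
    · simp only [Bool.and_eq_true] at h3
      obtain ⟨hdev, hpre⟩ := h3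
      have hdev' := (PySem.Chars.startswith_iff _ _).mp hdev
      rw [replaceFirstDev_of_prefix _ hdev'] at hpre
      simp only [true_iff]
      exact ⟨k, by simp, h1, Or.inr ⟨hdev', (PySem.Chars.startswith_iff _ _).mp hpre⟩⟩
    · rw [ih]; unfold fmP
      constructor
      · rintro ⟨k', hk', hne, hor⟩; exact ⟨k', List.mem_cons_of_mem _ hk', hne, hor⟩
      · rintro ⟨k', hk', hne, hor⟩
        rcases List.mem_cons.mp hk' with rfl | hmem
        · exfalso
          rcases hor with hp | ⟨hdev, hp5⟩
          · exact h2 ((PySem.Chars.startswith_iff _ _).mpr hp)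
          · apply h3
            simp only [Bool.and_eq_true]
            refine ⟨(PySem.Chars.startswith_iff _ _).mpr hdev, ?_⟩
            rw [replaceFirstDev_of_prefix _ hdev]
            exact (PySem.Chars.startswith_iff _ _).mpr hp5
        · exact ⟨k', hmem, hne, hor⟩

-- characterisation of B's one-pass prefix set
lemma mem_fmB_step (s : PySem.Set String) (k y : String) : y ∈ fmB_step s k ↔
    y ∈ s ∨ (k ≠ "" ∧ (y = k ∨ ("/dev/".toList <+: k.toList ∧ y.toList = k.toList.drop 5))) := by
  unfold fmB_step
  by_cases hk : k = ""
  · simp [hk]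
  · rw [if_pos hk]
    by_cases hdev : PySem.Str.startswith k "/dev/" = true
    · have hdev' : "/dev/".toList <+: k.toList :=
        (PySem.Chars.startswith_iff k.toList "/dev/".toList).mp (by simpa using hdev)
      have hsl : (PySem.Str.slice k (some 5) none).toList = k.toList.drop 5 := by
        simp [PySem.Str.toList_slice, PySem.List.slice_from]
      have hy5 : (y = PySem.Str.slice k (some 5) none) ↔ (y.toList = k.toList.drop 5) :=
        ⟨fun h => by rw [h, hsl], fun h => String.toList_inj.mp (by rw [hsl]; exact h)⟩
      rw [if_pos hdev, PySem.Set.mem_add, PySem.Set.mem_add, hy5]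
      constructor
      · rintro ((h | h) | h)
        exacts [Or.inl h, Or.inr ⟨hk, Or.inl h⟩, Or.inr ⟨hk, Or.inr ⟨hdev', h⟩⟩]
      · rintro (h | ⟨-, (h | ⟨-, h⟩)⟩)
        exacts [Or.inl (Or.inl h), Or.inl (Or.inr h), Or.inr h]
    · have hdev' : ¬ ("/dev/".toList <+: k.toList) := fun hp =>
        hdev (by simpa using (PySem.Chars.startswith_iff k.toList "/dev/".toList).mpr hp)
      rw [if_neg hdev, PySem.Set.mem_add]
      constructor
      · rintro (h | h)
        exacts [Or.inl h, Or.inr ⟨hk, Or.inl h⟩]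
      · rintro (h | ⟨-, (h | ⟨hd, -⟩)⟩)
        exacts [Or.inl h, Or.inr h, absurd hd hdev']

lemma mem_fmB_fold (x : String) (ks : List String) (s : PySem.Set String) :
    (x ∈ ks.foldl fmB_step s) ↔
    x ∈ s ∨ ∃ k ∈ ks, k ≠ "" ∧ (x = k ∨ ("/dev/".toList <+: k.toList ∧ x.toList = k.toList.drop 5)) := by
  induction ks generalizing s with
  | nil => simp
  | cons k ks ih =>
    rw [List.foldl_cons, ih (fmB_step s k), mem_fmB_step s k x]
    simp only [List.mem_cons, exists_eq_or_imp]
    rw [or_assoc]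

lemma mem_fmB_prefixes (x : String) (ks : List String) :
    x ∈ fmB_prefixes ks ↔
      ∃ k ∈ ks, k ≠ "" ∧ (x = k ∨ ("/dev/".toList <+: k.toList ∧ x.toList = k.toList.drop 5)) := by
  unfold fmB_prefixes
  rw [mem_fmB_fold]
  simp [PySem.Set.empty]

lemma fmB_any_iff (d : String) (ks : List String) :
    ((PySem.Set.ofList ((fmB_prefixes ks).map (fun p => PySem.Str.len p))).any
        (fun l => decide (l ≤ PySem.Str.len d)
          && PySem.Set.contains (fmB_prefixes ks) (PySem.Str.slice d none (some l))) = true)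
      ↔ fmP d.toList ks := by
  rw [List.any_eq_true]
  constructor
  · rintro ⟨l, hl, hpred⟩
    rw [Bool.and_eq_true, decide_eq_true_eq] at hpred
    obtain ⟨hle, hc⟩ := hpred
    have hl0 : 0 ≤ l := by
      have := (PySem.Set.mem_ofList _ _).mp hl
      obtain ⟨p, -, rfl⟩ := List.mem_map.mp this
      simp [PySem.Str.len_eq]
    have hmem := (PySem.Set.contains_iff _ _).mp hc
    rw [mem_fmB_prefixes] at hmem
    obtain ⟨k, hk, hne, hor⟩ := hmem
    have hsl : (PySem.Str.slice d none (some l)).toList = d.toList.take l.toNat := by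
      simp [PySem.Str.toList_slice, PySem.List.slice_to _ hl0]
    refine ⟨k, hk, hne, ?_⟩
    rcases hor with rfl | ⟨hdev, hx⟩
    · left
      have : (PySem.Str.slice d none (some l)).toList <+: d.toList := by
        rw [hsl]; exact List.take_prefix _ _
      exact this
    · right
      refine ⟨hdev, ?_⟩
      rw [← hx, hsl]
      exact List.take_prefix _ _
  · rintro ⟨k, hk, hne, hor⟩
    have key : ∀ p : List Char, p <+: d.toList →
        (∃ x : String, x.toList = p ∧ x ∈ fmB_prefixes ks) →
        ∃ l ∈ PySem.Set.ofList ((fmB_prefixes ks).map (fun p => PySem.Str.len p)),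
          (decide (l ≤ PySem.Str.len d)
            && PySem.Set.contains (fmB_prefixes ks) (PySem.Str.slice d none (some l))) = true := by
      rintro p hp ⟨x, hx, hxs⟩
      refine ⟨(p.length : Int), ?_, ?_⟩
      · apply (PySem.Set.mem_ofList _ _).mpr
        apply List.mem_map.mpr
        exact ⟨x, hxs, by simp [PySem.Str.len_eq, hx]⟩
      · rw [Bool.and_eq_true, decide_eq_true_eq]
        constructor
        · have := hp.length_le
          simp only [PySem.Str.len_eq]
          omega
        · apply (PySem.Set.contains_iff _ _).mpr
          have hsl : (PySem.Str.slice d none (some (p.length : Int))).toList = p := by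
            simp only [PySem.Str.toList_slice, PySem.Chars.slice_eq_listSlice,
              PySem.List.slice_to_natCast]
            exact (List.prefix_iff_eq_take.mp hp).symm
          have : PySem.Str.slice d none (some (p.length : Int)) = x :=
            String.toList_inj.mp (by rw [hsl, hx])
          rw [this]; exact hxs
    rcases hor with hp | ⟨hdev, hp⟩
    · exact key k.toList hp ⟨k, rfl, (mem_fmB_prefixes k ks).mpr ⟨k, hk, hne, Or.inl rfl⟩⟩
    · refine key (k.toList.drop 5) hp ⟨PySem.Str.slice k (some 5) none, ?_, ?_⟩
      · simp [PySem.Str.toList_slice, PySem.List.slice_from]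
      · refine (mem_fmB_prefixes _ ks).mpr ⟨k, hk, hne, Or.inr ⟨hdev, ?_⟩⟩
        simp [PySem.Str.toList_slice, PySem.List.slice_from]

-- ===== VERDICT (by name: the statement is the Claim_ definition above) =====
theorem filesystem_matches_disk_prefix_py_spec : Claim_equal_filesystem_matches_disk_prefix_py := by
  intro devicefile disk_keys _
  unfold Spec_filesystem_matches_disk_prefix_py
  cases devicefile with
  | none => rfl
  | some d =>
    simp only [filesystem_matches_disk_prefix_py, filesystem_matches_disk_prefix_py_alt]
    split_ifs with h
    · rfl
    · rw [Bool.eq_iff_iff, fmA_loop_iff, fmB_any_iff]
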